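-- pv_equiv track=rewrite | github.com/MokshithRao/CSPP | RECAP_CSPP/Nov7/Categorize_Numbers - student/solution.py | Categorize_numbers
-- ===== SOURCE A (Python) =====
-- def Categorize_numbers(l):
--     d = {'even':[], 'odd':[], 'positive':[], 'negative':[]}
--
--     for i in l:
--         if i%2 == 0:
--             d['even'] += [i]
--         if i%2 != 0:
--             d['odd'] += [i]
--         if i>0:
--             d['positive'] += [i]
--         if i<0:
--             d['negative'] += [i]
--
--     return d
-- ===== SOURCE B (Python) =====
-- def _cat(l):
--     # divide and conquer: buckets of a concatenation are concatenations of buckets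
--     if len(l) == 0:
--         return [], [], [], []
--     if len(l) == 1:
--         i = l[0]
--         return ([i] if i % 2 == 0 else [],
--                 [i] if i % 2 != 0 else [],
--                 [i] if i > 0 else [],
--                 [i] if i < 0 else [])
--     mid = len(l) // 2
--     e1, o1, p1, n1 = _cat(l[:mid])
--     e2, o2, p2, n2 = _cat(l[mid:])
--     return e1 + e2, o1 + o2, p1 + p2, n1 + n2
--
-- def Categorize_numbers(l):
--     e, o, p, n = _cat(l)
--     return {'even': e, 'odd': o, 'positive': p, 'negative': n}
-- ===== Notes on version B (the rewrite author's own statement) =====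
-- stated objective: alternative
-- what changed: Replaces the single left-to-right accumulating loop with a divide-and-conquer recursion: split the list in half, categorize each half, and concatenate the four buckets (correct because each bucket filter distributes over concatenation, preserving order).
import Mathlib
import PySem

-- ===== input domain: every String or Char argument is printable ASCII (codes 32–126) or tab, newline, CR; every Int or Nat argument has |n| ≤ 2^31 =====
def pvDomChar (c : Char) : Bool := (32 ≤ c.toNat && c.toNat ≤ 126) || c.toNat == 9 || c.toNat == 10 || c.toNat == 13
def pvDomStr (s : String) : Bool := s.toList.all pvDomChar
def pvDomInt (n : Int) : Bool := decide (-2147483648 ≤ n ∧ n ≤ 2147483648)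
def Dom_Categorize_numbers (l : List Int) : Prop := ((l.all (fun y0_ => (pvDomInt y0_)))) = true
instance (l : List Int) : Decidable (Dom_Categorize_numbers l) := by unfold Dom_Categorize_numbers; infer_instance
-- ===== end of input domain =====

-- B is a divide-and-conquer re-implementation (split, recurse, concatenate buckets); same values, alternative structure, not faster.

-- ===== PORT A =====
-- A's dict has the four fixed keys in a fixed insertion order; the loop appends to the
-- four bucket lists. Ported as a fold over the four bucket lists, rendered in that key order.
def Categorize_numbers (l : List Int) : List (String × List Int) :=
  let st := l.foldl
    (fun (d : List Int × List Int × List Int × List Int) i =>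
      let d := if PySem.Int.mod i 2 = 0 then (d.1 ++ [i], d.2.1, d.2.2.1, d.2.2.2) else d
      let d := if PySem.Int.mod i 2 ≠ 0 then (d.1, d.2.1 ++ [i], d.2.2.1, d.2.2.2) else d
      let d := if i > 0 then (d.1, d.2.1, d.2.2.1 ++ [i], d.2.2.2) else d
      let d := if i < 0 then (d.1, d.2.1, d.2.2.1, d.2.2.2 ++ [i]) else d
      d)
    ([], [], [], [])
  [("even", st.1), ("odd", st.2.1), ("positive", st.2.2.1), ("negative", st.2.2.2)]

-- ===== PORT B =====
-- _cat: Python's l[:mid] / l[mid:] with 0 ≤ mid ≤ len(l) are exactly List.take / List.drop.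
def catHalves (l : List Int) : List Int × List Int × List Int × List Int :=
  match l with
  | [] => ([], [], [], [])
  | [i] => ((if PySem.Int.mod i 2 = 0 then [i] else []),
            (if PySem.Int.mod i 2 ≠ 0 then [i] else []),
            (if i > 0 then [i] else []),
            (if i < 0 then [i] else []))
  | a :: b :: rest =>
    let r1 := catHalves ((a :: b :: rest).take ((a :: b :: rest).length / 2))
    let r2 := catHalves ((a :: b :: rest).drop ((a :: b :: rest).length / 2))
    (r1.1 ++ r2.1, r1.2.1 ++ r2.2.1, r1.2.2.1 ++ r2.2.2.1, r1.2.2.2 ++ r2.2.2.2)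
termination_by l.length
decreasing_by
  · simp [List.length_take]; omega
  · simp; omega

def Categorize_numbers_alt (l : List Int) : List (String × List Int) :=
  let r := catHalves l
  [("even", r.1), ("odd", r.2.1), ("positive", r.2.2.1), ("negative", r.2.2.2)]

-- ===== PRECONDITION & SPEC =====
def Spec_Categorize_numbers (l : List Int) (out : List (String × List Int)) : Prop := out = Categorize_numbers_alt l
instance (l : List Int) (out : List (String × List Int)) : Decidable (Spec_Categorize_numbers l out) := by unfold Spec_Categorize_numbers; infer_instance

-- ===== CLAIM (what is proved, stated in full; the proofs are below) =====
def Claim_equal_Categorize_numbers : Prop := ∀ (l : List Int), Dom_Categorize_numbers l → Spec_Categorize_numbers l (Categorize_numbers l)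

-- ===== LEMMAS AND PROOFS =====

theorem catA_fold (l e o p n : List Int) :
    l.foldl
      (fun (d : List Int × List Int × List Int × List Int) i =>
        let d := if PySem.Int.mod i 2 = 0 then (d.1 ++ [i], d.2.1, d.2.2.1, d.2.2.2) else d
        let d := if PySem.Int.mod i 2 ≠ 0 then (d.1, d.2.1 ++ [i], d.2.2.1, d.2.2.2) else d
        let d := if i > 0 then (d.1, d.2.1, d.2.2.1 ++ [i], d.2.2.2) else d
        let d := if i < 0 then (d.1, d.2.1, d.2.2.1, d.2.2.2 ++ [i]) else d
        d)
      (e, o, p, n) =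
    (e ++ l.filter (fun i => PySem.Int.mod i 2 = 0),
     o ++ l.filter (fun i => PySem.Int.mod i 2 ≠ 0),
     p ++ l.filter (fun i => i > 0),
     n ++ l.filter (fun i => i < 0)) := by
  induction l generalizing e o p n with
  | nil => simp
  | cons x xs ih =>
    simp only [List.foldl_cons, List.filter_cons]
    by_cases h1 : PySem.Int.mod x 2 = 0 <;> by_cases h2 : x > 0 <;> by_cases h3 : x < 0 <;>
      simp only [h1, h2, h3, ne_eq, not_true_eq_false, not_false_eq_true, ite_true, ite_false,
        decide_true, decide_false, ih, List.append_assoc, List.singleton_append] <;> simp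

theorem catHalves_eq (l : List Int) :
    catHalves l =
      (l.filter (fun i => PySem.Int.mod i 2 = 0),
       l.filter (fun i => PySem.Int.mod i 2 ≠ 0),
       l.filter (fun i => i > 0),
       l.filter (fun i => i < 0)) := by
  induction l using catHalves.induct with
  | case1 => simp [catHalves]
  | case2 i =>
    by_cases h1 : PySem.Int.mod i 2 = 0 <;> by_cases h2 : i > 0 <;> by_cases h3 : i < 0 <;>
      simp [catHalves, List.filter_cons, List.filter_nil, h2, h3]
  | case3 a b rest ih1 ih2 =>
    rw [catHalves]
    simp only [ih1, ih2]
    have h := List.take_append_drop ((a :: b :: rest).length / 2) (a :: b :: rest)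
    conv_rhs => rw [← h]
    simp only [List.filter_append]

-- ===== VERDICT (by name: the statement is the Claim_ definition above) =====
theorem Categorize_numbers_spec : Claim_equal_Categorize_numbers := by
  intro l _
  unfold Spec_Categorize_numbers Categorize_numbers Categorize_numbers_alt
  rw [catA_fold, catHalves_eq]
  simp
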